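-- pv_equiv track=rewrite | github.com/2yunsu/devide_team | main.py | merge_boyteam_with_girlteam
-- ===== SOURCE A (Python) =====
-- from heapq import heappop, heappush, heapify
--
-- def merge_boyteam_with_girlteam(boys_final, girls_final):
--     assert len(boys_final) == len(girls_final)
--     qboy = [[len(boys_final[i]), i] for i in range(len(boys_final))]
--     qgirl = [[-len(girls_final[i]), i] for i in range(len(girls_final))]
--     heapify(qboy)
--     heapify(qgirl)
--     final_team = [[] for _ in range(len(boys_final))]
--     i = 0
--     while len(qboy) > 0:
--         _, bidx = heappop(qboy)
--         _, gidx = heappop(qgirl)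
--         final_team[i].extend(boys_final[bidx])
--         final_team[i].extend(girls_final[gidx])
--         i += 1
--     return final_team
-- ===== SOURCE B (Python) =====
-- def merge_boyteam_with_girlteam(boys_final, girls_final):
--     assert len(boys_final) == len(girls_final)
--     n = len(boys_final)
--     boy_order = sorted(range(n), key=lambda i: len(boys_final[i]))
--     girl_order = sorted(range(n), key=lambda i: len(girls_final[i]), reverse=True)
--     return [boys_final[b] + girls_final[g] for b, g in zip(boy_order, girl_order)]
-- ===== Notes on version B (the rewrite author's own statement) =====
-- stated objective: simpler
-- what changed: Replaces the two heaps, heapify and the destructive pop loop over a preallocated mutable result with two stable index sorts (ascending sizes for boys, descending for girls, ties following original index order by stability) and a single zip comprehension; Pre_ excludes inputs of unequal lengths, on which A's assert raises AssertionError.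
import Mathlib
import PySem

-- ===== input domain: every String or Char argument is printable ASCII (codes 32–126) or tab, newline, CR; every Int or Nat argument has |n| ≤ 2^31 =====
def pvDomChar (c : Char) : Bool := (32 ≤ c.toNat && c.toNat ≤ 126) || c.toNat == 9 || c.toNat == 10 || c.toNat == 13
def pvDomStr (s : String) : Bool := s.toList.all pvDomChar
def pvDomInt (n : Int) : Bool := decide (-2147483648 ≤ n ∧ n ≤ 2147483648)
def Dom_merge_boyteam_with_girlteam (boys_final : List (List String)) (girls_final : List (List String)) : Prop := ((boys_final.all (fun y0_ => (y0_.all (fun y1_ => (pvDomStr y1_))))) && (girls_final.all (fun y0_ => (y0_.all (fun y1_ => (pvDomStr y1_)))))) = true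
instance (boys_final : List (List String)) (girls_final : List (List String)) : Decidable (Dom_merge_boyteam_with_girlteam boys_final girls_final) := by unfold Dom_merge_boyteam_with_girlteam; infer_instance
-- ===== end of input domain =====

-- B replaces A's two heaps and destructive pop loop by two stable index sorts and one zip
-- comprehension (objective: simpler). Equality is about return values; A also fills a
-- preallocated mutable list, B builds fresh lists.

-- ===== PORT A =====
-- Python list comparison on the two-element [int, int] heap entries is lexicographic.
def pvLexLtB (p q : Int × Int) : Bool := p.1 < q.1 || (p.1 == q.1 && p.2 < q.2)

-- first minimal element of m :: l under the lexicographic order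
def pvFindMin (m : Int × Int) (l : List (Int × Int)) : Int × Int :=
  l.foldl (fun m x => if pvLexLtB x m then x else m) m

-- needed by pvLoopA's termination proof
theorem pvFindMin_mem : ∀ (l : List (Int × Int)) (m : Int × Int), pvFindMin m l ∈ m :: l := by
  intro l
  induction l with
  | nil => intro m; simp [pvFindMin]
  | cons x xs ih =>
    intro m
    show List.foldl _ (if pvLexLtB x m then x else m) xs ∈ m :: x :: xs
    by_cases hc : pvLexLtB x m = true
    · rw [if_pos hc]
      have h := ih x
      simp [pvFindMin, List.mem_cons] at h ⊢
      tauto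
    · rw [if_neg hc]
      have h := ih m
      simp [pvFindMin, List.mem_cons] at h ⊢
      tauto

-- A's while loop: each heappop is ported as extracting the (first) minimal element of the
-- pool — the observable behaviour of heapq's heappop; heapify only reorders the pool.
-- The `[], _ :: _` case is where Python's heappop on the empty girls' heap would raise;
-- it is unreachable when the two pools have equal size (guaranteed by A's assert).
def pvLoopA (boys girls : List (List String)) : List (Int × Int) → List (Int × Int) → List (List String)
  | [], _ => []
  | _ :: _, [] => []
  | x :: xs, y :: ys =>
    let b := pvFindMin x xs
    let g := pvFindMin y ys
    (PySem.List.pyGetD boys b.2 [] ++ PySem.List.pyGetD girls g.2 []) ::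
      pvLoopA boys girls ((x :: xs).erase b) ((y :: ys).erase g)
  termination_by qb _ => qb.length
  decreasing_by
    have hb := pvFindMin_mem xs x
    have := List.length_erase_of_mem hb
    simp at this ⊢
    omega

def merge_boyteam_with_girlteam (boys_final : List (List String)) (girls_final : List (List String)) : List (List String) :=
  if boys_final.length == girls_final.length then
    let qboy := (PySem.List.pyRange 0 (boys_final.length : Int)).map
      (fun i => (((PySem.List.pyGetD boys_final i []).length : Int), i))
    let qgirl := (PySem.List.pyRange 0 (girls_final.length : Int)).map
      (fun i => (-((PySem.List.pyGetD girls_final i []).length : Int), i))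
    pvLoopA boys_final girls_final qboy qgirl
  else []  -- assert fails (AssertionError): excluded by Pre_

-- ===== PORT B =====
def merge_boyteam_with_girlteam_alt (boys_final : List (List String)) (girls_final : List (List String)) : List (List String) :=
  if boys_final.length == girls_final.length then
    let n : Int := (boys_final.length : Int)
    let boy_order := PySem.List.sorted (PySem.List.pyRange 0 n)
      (fun i => ((PySem.List.pyGetD boys_final i []).length : Int)) false
    let girl_order := PySem.List.sorted (PySem.List.pyRange 0 n)
      (fun i => ((PySem.List.pyGetD girls_final i []).length : Int)) true
    (boy_order.zip girl_order).map
      (fun bg => PySem.List.pyGetD boys_final bg.1 [] ++ PySem.List.pyGetD girls_final bg.2 [])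
  else []  -- assert fails (AssertionError): excluded by Pre_

-- ===== PRECONDITION & SPEC =====
-- Pre_ excludes exactly the inputs of unequal lengths, on which A's assert raises AssertionError.
def Pre_merge_boyteam_with_girlteam (boys_final : List (List String)) (girls_final : List (List String)) : Prop :=
  boys_final.length = girls_final.length
instance (boys_final : List (List String)) (girls_final : List (List String)) : Decidable (Pre_merge_boyteam_with_girlteam boys_final girls_final) := by unfold Pre_merge_boyteam_with_girlteam; infer_instance

def pvWitness_merge_boyteam_with_girlteam : List (List String) × List (List String) :=
  ([["a"], ["b", "c"]], [["d"], []])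

def Spec_merge_boyteam_with_girlteam (boys_final : List (List String)) (girls_final : List (List String)) (out : List (List String)) : Prop := out = merge_boyteam_with_girlteam_alt boys_final girls_final
instance (boys_final : List (List String)) (girls_final : List (List String)) (out : List (List String)) : Decidable (Spec_merge_boyteam_with_girlteam boys_final girls_final out) := by unfold Spec_merge_boyteam_with_girlteam; infer_instance

-- ===== CLAIM (what is proved, stated in full; the proofs are below) =====
def Claim_equal_merge_boyteam_with_girlteam : Prop := ∀ (boys_final : List (List String)) (girls_final : List (List String)), Dom_merge_boyteam_with_girlteam boys_final girls_final → Pre_merge_boyteam_with_girlteam boys_final girls_final → Spec_merge_boyteam_with_girlteam boys_final girls_final (merge_boyteam_with_girlteam boys_final girls_final)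

-- ===== LEMMAS AND PROOFS =====

def pvLLt (p q : Int × Int) : Prop := p.1 < q.1 ∨ (p.1 = q.1 ∧ p.2 < q.2)
def pvLLe (p q : Int × Int) : Prop := p.1 < q.1 ∨ (p.1 = q.1 ∧ p.2 ≤ q.2)

theorem pvLexLtB_iff (p q : Int × Int) : pvLexLtB p q = true ↔ pvLLt p q := by
  simp [pvLexLtB, pvLLt]

theorem pvLLe_refl (p : Int × Int) : pvLLe p p := Or.inr ⟨rfl, le_refl _⟩

theorem pvLLe_trans {a b c : Int × Int} (h1 : pvLLe a b) (h2 : pvLLe b c) : pvLLe a c := by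
  unfold pvLLe at *; omega

theorem pvLLe_of_LLt {a b : Int × Int} (h : pvLLt a b) : pvLLe a b := by
  unfold pvLLt at h; unfold pvLLe; omega

theorem pvLLe_of_not_LLt {a b : Int × Int} (h : ¬ pvLLt a b) : pvLLe b a := by
  unfold pvLLt at h; unfold pvLLe; omega

theorem pvLLt_of_LLe_ne {a b : Int × Int} (h : pvLLe a b) (hne : a ≠ b) : pvLLt a b := by
  rw [Ne, Prod.ext_iff, not_and_or] at hne
  unfold pvLLe at h; unfold pvLLt
  rcases hne with h' | h' <;> omega

-- pvFindMin m l is a lower bound of m :: l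
theorem pvFindMin_le : ∀ (l : List (Int × Int)) (m : Int × Int),
    pvLLe (pvFindMin m l) m ∧ ∀ y ∈ l, pvLLe (pvFindMin m l) y := by
  intro l
  induction l with
  | nil => intro m; exact ⟨pvLLe_refl m, by simp⟩
  | cons x xs ih =>
    intro m
    have heq : pvFindMin m (x :: xs) = pvFindMin (if pvLexLtB x m then x else m) xs := rfl
    have h := ih (if pvLexLtB x m then x else m)
    rw [heq]
    by_cases hc : pvLexLtB x m = true
    · have hxm : pvLLt x m := (pvLexLtB_iff _ _).mp hc
      rw [if_pos hc] at h ⊢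
      refine ⟨pvLLe_trans h.1 (pvLLe_of_LLt hxm), ?_⟩
      intro y hy
      rcases List.mem_cons.mp hy with rfl | hy
      · exact h.1
      · exact h.2 y hy
    · have hxm : pvLLe m x := pvLLe_of_not_LLt (fun hl => hc ((pvLexLtB_iff _ _).mpr hl))
      rw [if_neg hc] at h ⊢
      refine ⟨h.1, ?_⟩
      intro y hy
      rcases List.mem_cons.mp hy with rfl | hy
      · exact pvLLe_trans h.1 hxm
      · exact h.2 y hy

theorem pvFindMin_lb : ∀ (l : List (Int × Int)) (m : Int × Int), ∀ y ∈ m :: l, pvLLe (pvFindMin m l) y := by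
  intro l m y hy
  rcases List.mem_cons.mp hy with h | hy
  · exact h ▸ (pvFindMin_le l m).1
  · exact (pvFindMin_le l m).2 y hy

-- selection sort induced by repeatedly extracting the minimum (mirrors A's pop sequence)
def pvSelSort : List (Int × Int) → List (Int × Int)
  | [] => []
  | x :: xs => pvFindMin x xs :: pvSelSort ((x :: xs).erase (pvFindMin x xs))
  termination_by l => l.length
  decreasing_by
    have hb := pvFindMin_mem xs x
    have := List.length_erase_of_mem hb
    simp at this ⊢
    omega

theorem pvSelSort_perm : ∀ (l : List (Int × Int)), (pvSelSort l).Perm l := by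
  intro l
  induction l using pvSelSort.induct with
  | case1 => simp [pvSelSort]
  | case2 x xs ih =>
    rw [pvSelSort]
    exact ((ih.cons _).trans (List.perm_cons_erase (pvFindMin_mem xs x)).symm)

theorem pvSelSort_pairwise : ∀ (l : List (Int × Int)), l.Nodup → (pvSelSort l).Pairwise pvLLt := by
  intro l
  induction l using pvSelSort.induct with
  | case1 => intro _; simp [pvSelSort]
  | case2 x xs ih =>
    intro hnd
    rw [pvSelSort]
    refine List.Pairwise.cons ?_ (ih (hnd.erase _))
    intro z hz
    have hz' : z ∈ (x :: xs).erase (pvFindMin x xs) := (pvSelSort_perm _).mem_iff.mp hz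
    have hzmem : z ∈ x :: xs := List.mem_of_mem_erase hz'
    have hzne : z ≠ pvFindMin x xs := (List.Nodup.mem_erase_iff hnd |>.mp hz').1
    exact pvLLt_of_LLe_ne (pvFindMin_lb xs x z hzmem) (Ne.symm hzne)

-- A's loop is the zip of the two pop (selection-sort) sequences
theorem pvLoopA_eq (boys girls : List (List String)) :
    ∀ (qb qg : List (Int × Int)), qb.length = qg.length →
    pvLoopA boys girls qb qg = ((pvSelSort qb).zip (pvSelSort qg)).map
      (fun bg => PySem.List.pyGetD boys bg.1.2 [] ++ PySem.List.pyGetD girls bg.2.2 []) := by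
  intro qb
  induction qb using pvSelSort.induct with
  | case1 =>
    intro qg h
    have : qg = [] := List.length_eq_zero_iff.mp (by simpa using h.symm)
    subst this
    simp [pvLoopA, pvSelSort]
  | case2 x xs ih =>
    intro qg h
    match qg with
    | [] => simp at h
    | y :: ys =>
      rw [pvLoopA, pvSelSort, pvSelSort]
      have hlen : ((x :: xs).erase (pvFindMin x xs)).length = ((y :: ys).erase (pvFindMin y ys)).length := by
        have h1 := List.length_erase_of_mem (pvFindMin_mem xs x)
        have h2 := List.length_erase_of_mem (pvFindMin_mem ys y)
        simp at h h1 h2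
        omega
      rw [ih _ hlen]
      simp

-- stability of PySem's insertion sort, ascending: on a strictly increasing input list the
-- result is strictly increasing in (key, value) lexicographic order
theorem pvInsert_stab_false (key : Int → Int) (x : Int) :
    ∀ (acc : List Int),
    acc.Pairwise (fun a b => key a < key b ∨ (key a = key b ∧ a < b)) →
    (∀ a ∈ acc, a < x) →
    (PySem.List.insertBy (fun a b => decide (key a < key b)) x acc).Pairwise
      (fun a b => key a < key b ∨ (key a = key b ∧ a < b)) := by
  intro acc
  induction acc with
  | nil => intro _ _; simp [PySem.List.insertBy]
  | cons y ys ih =>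
    intro hpw hlt
    by_cases h : key x < key y
    · have : PySem.List.insertBy (fun a b => decide (key a < key b)) x (y :: ys) = x :: y :: ys := by
        simp [PySem.List.insertBy, h]
      rw [this]
      refine List.Pairwise.cons ?_ hpw
      intro z hz
      rcases List.mem_cons.mp hz with rfl | hz
      · exact Or.inl h
      · have := List.rel_of_pairwise_cons hpw hz
        omega
    · have : PySem.List.insertBy (fun a b => decide (key a < key b)) x (y :: ys)
          = y :: PySem.List.insertBy (fun a b => decide (key a < key b)) x ys := by
        simp [PySem.List.insertBy, h]
      rw [this]
      refine List.Pairwise.cons ?_ (ih hpw.of_cons (fun a ha => hlt a (List.mem_cons_of_mem _ ha)))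
      intro z hz
      rcases (PySem.List.mem_insertBy _ _ _ _).mp hz with rfl | hz
      · have hyx : y < z := hlt y List.mem_cons_self
        omega
      · exact List.rel_of_pairwise_cons hpw hz

theorem pvFoldl_stab_false (key : Int → Int) :
    ∀ (xs acc : List Int),
    acc.Pairwise (fun a b => key a < key b ∨ (key a = key b ∧ a < b)) →
    (∀ a ∈ acc, ∀ b ∈ xs, a < b) →
    xs.Pairwise (· < ·) →
    (xs.foldl (fun acc x => PySem.List.insertBy (fun a b => decide (key a < key b)) x acc) acc).Pairwise
      (fun a b => key a < key b ∨ (key a = key b ∧ a < b)) := by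
  intro xs
  induction xs with
  | nil => intro acc h _ _; simpa using h
  | cons x xs ih =>
    intro acc hpw hcross hxs
    simp only [List.foldl_cons]
    refine ih _ (pvInsert_stab_false key x acc hpw (fun a ha => hcross a ha x List.mem_cons_self)) ?_ hxs.of_cons
    intro a ha b hb
    rcases (PySem.List.mem_insertBy _ _ _ _).mp ha with rfl | ha
    · exact List.rel_of_pairwise_cons hxs hb
    · exact hcross a ha b (List.mem_cons_of_mem _ hb)

theorem pvSorted_stab_false (key : Int → Int) (xs : List Int) (h : xs.Pairwise (· < ·)) :
    (PySem.List.sorted xs key false).Pairwise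
      (fun a b => key a < key b ∨ (key a = key b ∧ a < b)) := by
  rw [PySem.List.sorted_eq_foldl_insertBy]
  exact pvFoldl_stab_false key xs [] (by simp) (by simp) h

-- the reverse=True twins
theorem pvSorted_true_eq (key : Int → Int) (xs : List Int) :
    PySem.List.sorted xs key true
      = xs.foldl (fun acc x => PySem.List.insertBy (fun a b => decide (key b < key a)) x acc) [] := rfl

theorem pvInsert_stab_true (key : Int → Int) (x : Int) :
    ∀ (acc : List Int),
    acc.Pairwise (fun a b => key b < key a ∨ (key a = key b ∧ a < b)) →
    (∀ a ∈ acc, a < x) →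
    (PySem.List.insertBy (fun a b => decide (key b < key a)) x acc).Pairwise
      (fun a b => key b < key a ∨ (key a = key b ∧ a < b)) := by
  intro acc
  induction acc with
  | nil => intro _ _; simp [PySem.List.insertBy]
  | cons y ys ih =>
    intro hpw hlt
    by_cases h : key y < key x
    · have : PySem.List.insertBy (fun a b => decide (key b < key a)) x (y :: ys) = x :: y :: ys := by
        simp [PySem.List.insertBy, h]
      rw [this]
      refine List.Pairwise.cons ?_ hpw
      intro z hz
      rcases List.mem_cons.mp hz with rfl | hz
      · exact Or.inl h
      · have := List.rel_of_pairwise_cons hpw hz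
        omega
    · have : PySem.List.insertBy (fun a b => decide (key b < key a)) x (y :: ys)
          = y :: PySem.List.insertBy (fun a b => decide (key b < key a)) x ys := by
        simp [PySem.List.insertBy, h]
      rw [this]
      refine List.Pairwise.cons ?_ (ih hpw.of_cons (fun a ha => hlt a (List.mem_cons_of_mem _ ha)))
      intro z hz
      rcases (PySem.List.mem_insertBy _ _ _ _).mp hz with rfl | hz
      · have hyx : y < z := hlt y List.mem_cons_self
        omega
      · exact List.rel_of_pairwise_cons hpw hz

theorem pvFoldl_stab_true (key : Int → Int) :
    ∀ (xs acc : List Int),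
    acc.Pairwise (fun a b => key b < key a ∨ (key a = key b ∧ a < b)) →
    (∀ a ∈ acc, ∀ b ∈ xs, a < b) →
    xs.Pairwise (· < ·) →
    (xs.foldl (fun acc x => PySem.List.insertBy (fun a b => decide (key b < key a)) x acc) acc).Pairwise
      (fun a b => key b < key a ∨ (key a = key b ∧ a < b)) := by
  intro xs
  induction xs with
  | nil => intro acc h _ _; simpa using h
  | cons x xs ih =>
    intro acc hpw hcross hxs
    simp only [List.foldl_cons]
    refine ih _ (pvInsert_stab_true key x acc hpw (fun a ha => hcross a ha x List.mem_cons_self)) ?_ hxs.of_cons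
    intro a ha b hb
    rcases (PySem.List.mem_insertBy _ _ _ _).mp ha with rfl | ha
    · exact List.rel_of_pairwise_cons hxs hb
    · exact hcross a ha b (List.mem_cons_of_mem _ hb)

theorem pvSorted_stab_true (key : Int → Int) (xs : List Int) (h : xs.Pairwise (· < ·)) :
    (PySem.List.sorted xs key true).Pairwise
      (fun a b => key b < key a ∨ (key a = key b ∧ a < b)) := by
  rw [pvSorted_true_eq]
  exact pvFoldl_stab_true key xs [] (by simp) (by simp) h

-- the pop-until-empty sequence over [(key i, i)] equals the stable ascending sort of the indices
theorem pvSel_eq_sorted_false (key : Int → Int) (P : List Int) (hP : P.Pairwise (· < ·)) :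
    pvSelSort (P.map (fun i => (key i, i)))
      = (PySem.List.sorted P key false).map (fun i => (key i, i)) := by
  have hinj : Function.Injective (fun i : Int => (key i, i)) := by
    intro a b h; simpa using congrArg Prod.snd h
  have hndP : P.Nodup := hP.imp (fun h => ne_of_lt h)
  have hnd : (P.map (fun i => (key i, i))).Nodup := hndP.map hinj
  have hperm : (pvSelSort (P.map (fun i => (key i, i)))).Perm (P.map (fun i => (key i, i))) := pvSelSort_perm _
  have hpw : (pvSelSort (P.map (fun i => (key i, i)))).Pairwise pvLLt := pvSelSort_pairwise _ hnd
  have hform : ∀ z ∈ pvSelSort (P.map (fun i => (key i, i))), (fun i : Int => (key i, i)) z.2 = z := by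
    intro z hz
    have : z ∈ P.map (fun i => (key i, i)) := hperm.mem_iff.mp hz
    obtain ⟨i, _, rfl⟩ := List.mem_map.mp this
    rfl
  have hL : pvSelSort (P.map (fun i => (key i, i)))
      = ((pvSelSort (P.map (fun i => (key i, i)))).map Prod.snd).map (fun i => (key i, i)) := by
    rw [List.map_map]
    exact ((List.map_congr_left (fun z hz => hform z hz)).trans (List.map_id _)).symm
  set js := (pvSelSort (P.map (fun i => (key i, i)))).map Prod.snd with hjs
  have hjsperm : js.Perm P := by
    have h2 := hperm.map Prod.snd
    rw [List.map_map] at h2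
    have h3 : P.map (Prod.snd ∘ fun i => (key i, i)) = P :=
      (List.map_congr_left (fun i _ => rfl)).trans (List.map_id _)
    rw [h3] at h2
    exact h2
  have hjspw : js.Pairwise (fun a b => key a < key b ∨ (key a = key b ∧ a < b)) := by
    rw [hL] at hpw
    rw [List.pairwise_map] at hpw
    exact hpw.imp (fun h => by simpa [pvLLt] using h)
  have hSpw := pvSorted_stab_false key P hP
  have hSperm := PySem.List.sorted_perm P key false
  have hjseq : js = PySem.List.sorted P key false := by
    refine List.eq_of_perm_of_sorted ?_ hjspw hSpw (hjsperm.trans hSperm.symm)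
    intro a b _ _ h1 h2
    omega
  rw [hL, hjseq]

theorem pvSel_eq_sorted_true (key : Int → Int) (P : List Int) (hP : P.Pairwise (· < ·)) :
    pvSelSort (P.map (fun i => (-key i, i)))
      = (PySem.List.sorted P key true).map (fun i => (-key i, i)) := by
  have hinj : Function.Injective (fun i : Int => (-key i, i)) := by
    intro a b h; simpa using congrArg Prod.snd h
  have hndP : P.Nodup := hP.imp (fun h => ne_of_lt h)
  have hnd : (P.map (fun i => (-key i, i))).Nodup := hndP.map hinj
  have hperm : (pvSelSort (P.map (fun i => (-key i, i)))).Perm (P.map (fun i => (-key i, i))) := pvSelSort_perm _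
  have hpw : (pvSelSort (P.map (fun i => (-key i, i)))).Pairwise pvLLt := pvSelSort_pairwise _ hnd
  have hform : ∀ z ∈ pvSelSort (P.map (fun i => (-key i, i))), (fun i : Int => (-key i, i)) z.2 = z := by
    intro z hz
    have : z ∈ P.map (fun i => (-key i, i)) := hperm.mem_iff.mp hz
    obtain ⟨i, _, rfl⟩ := List.mem_map.mp this
    rfl
  have hL : pvSelSort (P.map (fun i => (-key i, i)))
      = ((pvSelSort (P.map (fun i => (-key i, i)))).map Prod.snd).map (fun i => (-key i, i)) := by
    rw [List.map_map]
    exact ((List.map_congr_left (fun z hz => hform z hz)).trans (List.map_id _)).symm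
  set js := (pvSelSort (P.map (fun i => (-key i, i)))).map Prod.snd with hjs
  have hjsperm : js.Perm P := by
    have h2 := hperm.map Prod.snd
    rw [List.map_map] at h2
    have h3 : P.map (Prod.snd ∘ fun i => (-key i, i)) = P :=
      (List.map_congr_left (fun i _ => rfl)).trans (List.map_id _)
    rw [h3] at h2
    exact h2
  have hjspw : js.Pairwise (fun a b => key b < key a ∨ (key a = key b ∧ a < b)) := by
    rw [hL] at hpw
    rw [List.pairwise_map] at hpw
    exact hpw.imp (fun h => by simp only [pvLLt] at h; omega)
  have hSpw := pvSorted_stab_true key P hP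
  have hSperm := PySem.List.sorted_perm P key true
  have hjseq : js = PySem.List.sorted P key true := by
    refine List.eq_of_perm_of_sorted ?_ hjspw hSpw (hjsperm.trans hSperm.symm)
    intro a b _ _ h1 h2
    omega
  rw [hL, hjseq]

-- ===== VERDICT (by name: the statement is the Claim_ definition above) =====
theorem merge_boyteam_with_girlteam_spec : Claim_equal_merge_boyteam_with_girlteam := by
  intro boys girls _ hpre
  unfold Spec_merge_boyteam_with_girlteam
  unfold Pre_merge_boyteam_with_girlteam at hpre
  unfold merge_boyteam_with_girlteam merge_boyteam_with_girlteam_alt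
  have hbeq : (boys.length == girls.length) = true := by simpa using hpre
  rw [hbeq]
  simp only [if_true]
  have hn : (girls.length : Int) = (boys.length : Int) := by exact_mod_cast hpre.symm
  rw [hn]
  set P := PySem.List.pyRange 0 (boys.length : Int) with hPdef
  have hPpw : P.Pairwise (· < ·) := PySem.List.pairwise_lt_pyRange_one 0 (boys.length : Int)
  set kb := fun i : Int => ((PySem.List.pyGetD boys i []).length : Int) with hkb
  set kg := fun i : Int => ((PySem.List.pyGetD girls i []).length : Int) with hkg
  have hlen : (P.map (fun i => (kb i, i))).length = (P.map (fun i => (-kg i, i))).length := by simp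
  rw [pvLoopA_eq boys girls _ _ hlen]
  rw [pvSel_eq_sorted_false kb P hPpw, pvSel_eq_sorted_true kg P hPpw]
  rw [List.zip_map, List.map_map]
  refine List.map_congr_left ?_
  intro z _
  rfl
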